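-- pv_equiv track=rewrite | github.com/claggierk/CSADT | csadt_python/accuracy.py | makelistOfFolds
-- ===== SOURCE A (Python) =====
-- def makelistOfFolds(initialTrainingDataSet, k):
--     initialTrainingDataSetCopy = initialTrainingDataSet.copy()
--     listOfFolds = []
--     foldLength = int(len(initialTrainingDataSetCopy.keys())/k)
--     for i in range(k):
--         listOfFolds.append({})
--         for j in range(foldLength):
--             recordPair = initialTrainingDataSetCopy.popitem()
--             listOfFolds[i][recordPair[0]] = recordPair[1]
--     return listOfFolds
-- ===== SOURCE B (Python) =====
-- def makelistOfFolds(initialTrainingDataSet, k):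
--     items = list(initialTrainingDataSet.items())[::-1]
--     foldLength = int(len(items)/k)
--     return [dict(items[i*foldLength:(i+1)*foldLength]) for i in range(k)]
-- ===== Notes on version B (the rewrite author's own statement) =====
-- stated objective: simpler
-- what changed: B replaces A's destructive popitem double loop over a mutated dict copy with a single pass that reverses the item list once and slices it into k consecutive foldLength chunks; B does not mutate any dict.
import Mathlib
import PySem

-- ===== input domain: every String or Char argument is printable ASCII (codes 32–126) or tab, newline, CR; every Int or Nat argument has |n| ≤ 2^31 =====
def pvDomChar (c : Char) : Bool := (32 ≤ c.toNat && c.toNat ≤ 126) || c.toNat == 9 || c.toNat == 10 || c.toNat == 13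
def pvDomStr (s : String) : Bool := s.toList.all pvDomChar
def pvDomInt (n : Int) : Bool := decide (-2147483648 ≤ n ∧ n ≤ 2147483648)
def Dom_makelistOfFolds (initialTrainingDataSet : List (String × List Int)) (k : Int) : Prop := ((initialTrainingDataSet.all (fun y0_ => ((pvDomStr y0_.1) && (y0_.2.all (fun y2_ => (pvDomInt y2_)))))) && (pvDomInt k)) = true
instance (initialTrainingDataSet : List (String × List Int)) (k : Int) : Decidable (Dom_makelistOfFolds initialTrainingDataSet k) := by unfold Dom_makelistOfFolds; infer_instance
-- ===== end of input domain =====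

-- B replaces A's destructive popitem double loop with one reversal of the item list sliced
-- into k consecutive foldLength-chunks (objective: simpler; neither program mutates its input).

-- ===== PORT A =====
-- popitem step: pop the LAST item of the dict copy into the current fold
-- (the 'none' branch is Python's KeyError on an empty dict; it is unreachable for k ≠ 0).
def pvPopStep (s : List (String × List Int) × List (String × List Int)) :
    List (String × List Int) × List (String × List Int) :=
  match s.1.getLast? with
  | some rp => (s.1.dropLast, s.2 ++ [rp])
  | none => s

def makelistOfFolds (initialTrainingDataSet : List (String × List Int)) (k : Int) : List (List (String × List Int)) :=
  -- initialTrainingDataSetCopy = initialTrainingDataSet.copy() : items of the dict, insertion order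
  let copy := (PySem.Dict.ofList initialTrainingDataSet).items
  -- foldLength = int(len(copy.keys())/k)  (int() truncates toward zero)
  let foldLength := Int.tdiv (copy.length : Int) k
  let st := (PySem.List.pyRange 0 k 1).foldl
    (fun (st : List (String × List Int) × List (List (String × List Int))) _i =>
      -- listOfFolds.append({}) then the inner popitem loop fills fold i
      let st2 := (PySem.List.pyRange 0 foldLength 1).foldl (fun s _j => pvPopStep s) (st.1, [])
      (st2.1, st.2 ++ [st2.2]))
    (copy, [])
  st.2

-- ===== PORT B =====
def makelistOfFolds_alt (initialTrainingDataSet : List (String × List Int)) (k : Int) : List (List (String × List Int)) :=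
  -- items = list(d.items())[::-1]
  let items := (PySem.Dict.ofList initialTrainingDataSet).items.reverse
  let foldLength := Int.tdiv (items.length : Int) k
  (PySem.List.pyRange 0 k 1).map
    (fun i => PySem.List.slice items (some (i * foldLength)) (some ((i + 1) * foldLength)))

-- ===== PRECONDITION & SPEC =====
-- Pre_ excludes exactly k = 0, on which Python A raises ZeroDivisionError (int(len/0)).
def Pre_makelistOfFolds (initialTrainingDataSet : List (String × List Int)) (k : Int) : Prop := k ≠ 0
instance (initialTrainingDataSet : List (String × List Int)) (k : Int) : Decidable (Pre_makelistOfFolds initialTrainingDataSet k) := by unfold Pre_makelistOfFolds; infer_instance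

def pvWitness_makelistOfFolds : (List (String × List Int)) × Int := ([("a", [1]), ("b", [2]), ("c", [3])], 2)

def Spec_makelistOfFolds (initialTrainingDataSet : List (String × List Int)) (k : Int) (out : List (List (String × List Int))) : Prop := out = makelistOfFolds_alt initialTrainingDataSet k
instance (initialTrainingDataSet : List (String × List Int)) (k : Int) (out : List (List (String × List Int))) : Decidable (Spec_makelistOfFolds initialTrainingDataSet k out) := by unfold Spec_makelistOfFolds; infer_instance

-- ===== CLAIM (what is proved, stated in full; the proofs are below) =====
def Claim_equal_makelistOfFolds : Prop := ∀ (initialTrainingDataSet : List (String × List Int)) (k : Int), Dom_makelistOfFolds initialTrainingDataSet k → Pre_makelistOfFolds initialTrainingDataSet k → Spec_makelistOfFolds initialTrainingDataSet k (makelistOfFolds initialTrainingDataSet k)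

-- ===== LEMMAS AND PROOFS =====

-- a foldl whose body ignores the list element is an iterate
theorem pv_foldl_const {α β : Type} (g : β → β) (l : List α) (s : β) :
    l.foldl (fun b _ => g b) s = g^[l.length] s := by
  induction l generalizing s with
  | nil => rfl
  | cons x t ih => simp [List.foldl_cons, ih, Function.iterate_succ_apply]

-- f pops from the end of q.reverse = f items off the front of q
theorem pv_pop_iter (f : Nat) (q acc : List (String × List Int)) (h : f ≤ q.length) :
    pvPopStep^[f] (q.reverse, acc) = ((q.drop f).reverse, acc ++ q.take f) := by
  induction f generalizing q acc with
  | zero => simp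
  | succ f ih =>
    cases q with
    | nil => simp at h
    | cons x t =>
      rw [Function.iterate_succ_apply]
      have hstep : pvPopStep ((x :: t).reverse, acc) = (t.reverse, acc ++ [x]) := by
        simp [pvPopStep, List.getLast?_reverse]
      rw [hstep, ih t (acc ++ [x]) (by simpa using h)]
      simp

-- one round of the outer loop (the whole inner loop), as a named function
def pvOuterStep (f : Nat)
    (st : List (String × List Int) × List (List (String × List Int))) :
    List (String × List Int) × List (List (String × List Int)) :=
  ((pvPopStep^[f] (st.1, [])).1, st.2 ++ [(pvPopStep^[f] (st.1, [])).2])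

-- the outer loop: i rounds of (f pops each) produce the first i chunks of size f
theorem pv_outer_iter (f i : Nat) (q : List (String × List Int))
    (folds : List (List (String × List Int))) (h : i * f ≤ q.length) :
    (pvOuterStep f)^[i] (q.reverse, folds)
      = ((q.drop (i * f)).reverse,
         folds ++ (List.range i).map (fun t => (q.drop (t * f)).take f)) := by
  induction i generalizing q folds with
  | zero => simp
  | succ i ih =>
    rw [Function.iterate_succ_apply]
    have hf : f ≤ q.length := le_trans (by nlinarith) h
    have hstep : pvOuterStep f (q.reverse, folds) = ((q.drop f).reverse, folds ++ [q.take f]) := by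
      unfold pvOuterStep
      simp only [pv_pop_iter f q [] hf]
      simp
    rw [hstep]
    have hrest : i * f ≤ (q.drop f).length := by
      have h' : i * f + f ≤ q.length := by nlinarith
      simp [List.length_drop]; omega
    rw [ih (q.drop f) (folds ++ [q.take f]) hrest]
    refine Prod.ext ?_ ?_
    · simp only [List.drop_drop]
      congr 2
      rw [Nat.add_mul, Nat.one_mul]
      omega
    · simp only [List.range_succ_eq_map, List.map_cons, List.map_map, Nat.zero_mul,
        List.drop_zero, List.append_assoc, List.singleton_append]
      congr 1
      congr 1
      refine List.map_congr_left fun a _ => ?_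
      simp only [Function.comp_apply, List.drop_drop]
      congr 2
      rw [Nat.succ_mul]
      omega

-- A's whole double loop, for an exact integer fold length
theorem pv_loop_eq (c : List (String × List Int)) (m f : Nat) (fl : Int)
    (hfl : fl = (f : Int)) (hbound : m * f ≤ c.length) :
    ((PySem.List.pyRange 0 (m : Int) 1).foldl
      (fun (st : List (String × List Int) × List (List (String × List Int))) _i =>
        let st2 := (PySem.List.pyRange 0 fl 1).foldl (fun s _j => pvPopStep s) (st.1, [])
        (st2.1, st.2 ++ [st2.2]))
      (c, [])).2
    = (List.range m).map (fun t => ((c.reverse).drop (t * f)).take f) := by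
  have hbody : (fun (st : List (String × List Int) × List (List (String × List Int))) (_i : Int) =>
        let st2 := (PySem.List.pyRange 0 fl 1).foldl (fun s _j => pvPopStep s) (st.1, [])
        (st2.1, st.2 ++ [st2.2]))
      = (fun st _i => pvOuterStep f st) := by
    funext st _i
    unfold pvOuterStep
    rw [pv_foldl_const]
    have : (PySem.List.pyRange 0 fl 1).length = f := by
      subst hfl
      simp [PySem.List.length_pyRange_one]
    rw [this]
  rw [hbody, pv_foldl_const]
  have hlen : (PySem.List.pyRange 0 (m : Int) 1).length = m := by
    simp [PySem.List.length_pyRange_one]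
  rw [hlen]
  have h := pv_outer_iter f m c.reverse [] (by simpa using hbound)
  rw [List.reverse_reverse] at h
  rw [h]
  simp

theorem makelistOfFolds_spec : Claim_equal_makelistOfFolds := by
  intro l k _ hk
  unfold Spec_makelistOfFolds makelistOfFolds makelistOfFolds_alt
  simp only [List.length_reverse]
  set items := (PySem.Dict.ofList l).items with hitems
  rcases lt_trichotomy k 0 with hneg | hzero | hpos
  · -- k < 0 : both double loops run zero times
    rw [PySem.List.pyRange_one_eq_nil (le_of_lt hneg)]
    simp
  · exact absurd hzero hk
  · -- k > 0
    obtain ⟨m, rfl⟩ : ∃ m : Nat, k = (m : Int) :=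
      ⟨k.toNat, (Int.toNat_of_nonneg (le_of_lt hpos)).symm⟩
    set f : Nat := items.length / m with hfdef
    have htdiv : Int.tdiv (items.length : Int) (m : Int) = (f : Int) := by
      rw [Int.tdiv_eq_ediv_of_nonneg (by positivity)]
      exact (Int.natCast_div _ _).symm
    have hbound : m * f ≤ items.length := by
      rw [hfdef, Nat.mul_comm]
      exact Nat.div_mul_le_self items.length m
    rw [pv_loop_eq items m f _ htdiv hbound]
    -- B side: pyRange map of slices = the same chunks
    rw [htdiv, PySem.List.pyRange_one]
    simp only [Int.sub_zero, Int.toNat_natCast, List.map_map]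
    apply List.map_congr_left
    intro t _
    simp only [Function.comp]
    have h2 : ((0 : Int) + (t : Int)) * (f : Int) = ((t * f : Nat) : Int) := by push_cast; ring
    have h3 : ((0 : Int) + (t : Int) + 1) * (f : Int) = ((t * f : Nat) : Int) + ((f : Nat) : Int) := by
      push_cast
      ring
    rw [h2, h3, PySem.List.slice_natCast_add]
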